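-- pv_equiv track=rewrite | github.com/pypi-data/pypi-mirror-157 | packages/latin-databases/latin_databases-0.1.16.tar.gz/latin_databases-0.1.16/latin/o_memorize.py | remove_subset
-- ===== SOURCE A (Python) =====
-- def remove_subset(dct_word):
--     to_del = set()
--     for x in dct_word.keys():
--         if len(x) == 3:
--             for z in dct_word.keys():
--                 if z.endswith(x) and z != x:
--                     to_del.add(x)
--     for x in to_del:
--         del dct_word[x]
--     return dct_word
-- ===== SOURCE B (Python) =====
-- def remove_subset(dct_word):
--     groups = {}
--     for k in dct_word:
--         if len(k) >= 3:
--             groups.setdefault(k[-3:], []).append(k)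
--     for ks in groups.values():
--         if len(ks) > 1:
--             for k in ks:
--                 if len(k) == 3:
--                     del dct_word[k]
--     return dct_word
-- ===== Notes on version B (the rewrite author's own statement) =====
-- stated objective: alternative
-- what changed: A scans the whole key set once per 3-character key (all-pairs endswith test); B instead builds, in one pass, a dict grouping the keys of length >= 3 by their 3-character suffix, then walks the groups and deletes, for each suffix group with more than one member, the group's length-3 member.
import Mathlib
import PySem

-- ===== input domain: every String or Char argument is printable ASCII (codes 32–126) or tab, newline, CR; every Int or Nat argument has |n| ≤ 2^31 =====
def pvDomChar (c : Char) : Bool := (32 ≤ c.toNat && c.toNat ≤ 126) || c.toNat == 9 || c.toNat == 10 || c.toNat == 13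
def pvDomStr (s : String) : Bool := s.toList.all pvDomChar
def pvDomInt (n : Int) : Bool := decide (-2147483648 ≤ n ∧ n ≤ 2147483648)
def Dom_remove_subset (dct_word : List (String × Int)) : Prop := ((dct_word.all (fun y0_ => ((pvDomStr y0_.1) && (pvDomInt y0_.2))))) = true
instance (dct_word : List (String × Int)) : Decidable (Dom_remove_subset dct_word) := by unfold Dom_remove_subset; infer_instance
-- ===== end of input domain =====

-- B replaces A's all-pairs suffix scan (a full key scan per 3-char key) by a one-pass grouping
-- of the keys by their 3-character suffix, then deletes, per group with more than one member,
-- its length-3 member (objective: alternative). Like A, the Python B mutates dct_word in place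
-- and returns it.


-- ===== PORT A =====
-- The dict argument is reconstructed from its item list (PySem.Dict.ofList); the result is the
-- final dict's item list.  A iterates `to_del` (a Python set) only to delete keys — the final
-- dict does not depend on that iteration order, so folding over the PySem.Set's list is exact.
def remove_subset (dct_word : List (String × Int)) : List (String × Int) :=
  let d := PySem.Dict.ofList dct_word
  let to_del : PySem.Set String :=
    (PySem.Dict.keys d).foldl (fun s x =>
      if PySem.Str.len x == 3 then
        (PySem.Dict.keys d).foldl (fun s' z =>
          if PySem.Str.endswith z x && z != x then PySem.Set.add s' x else s') s
      else s) PySem.Set.empty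
  (to_del.foldl (fun d' x => d'.erase x) d).items

-- ===== PORT B =====
def remove_subset_alt (dct_word : List (String × Int)) : List (String × Int) :=
  let d := PySem.Dict.ofList dct_word
  let groups : PySem.Dict String (List String) :=
    (PySem.Dict.keys d).foldl (fun g k =>
      if 3 ≤ PySem.Str.len k then g.modify (PySem.Str.slice k (some (-3)) none) [] (· ++ [k]) else g)
      PySem.Dict.empty
  ((PySem.Dict.values groups).foldl (fun d' ks =>
      if 1 < ks.length then
        ks.foldl (fun d'' k => if PySem.Str.len k == 3 then d''.erase k else d'') d'
      else d') d).items

-- ===== PRECONDITION & SPEC =====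
def Spec_remove_subset (dct_word : List (String × Int)) (out : List (String × Int)) : Prop := out = remove_subset_alt dct_word
instance (dct_word : List (String × Int)) (out : List (String × Int)) : Decidable (Spec_remove_subset dct_word out) := by unfold Spec_remove_subset; infer_instance

-- ===== CLAIM (what is proved, stated in full; the proofs are below) =====
def Claim_equal_remove_subset : Prop := ∀ (dct_word : List (String × Int)), Dom_remove_subset dct_word → Spec_remove_subset dct_word (remove_subset dct_word)

-- ===== LEMMAS AND PROOFS =====

-- last 3 characters of a string, as B's port computes them (k[-3:])
def last3 (k : String) : String := PySem.Str.slice k (some (-3)) none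

theorem toList_last3 (k : String) : (last3 k).toList = k.toList.drop (k.toList.length - 3) := by
  simp [last3, PySem.Str.toList_slice, PySem.Chars.slice_eq_listSlice,
    PySem.List.slice_from_neg_ofNat _ 3 (by omega)]

-- deletion criterion shared by both programs
def delCond (K : List String) (x : String) : Prop :=
  x.toList.length = 3 ∧ ∃ z ∈ K, x.toList <:+ z.toList ∧ z ≠ x

theorem last3_of_len3 {y : String} (h : y.toList.length = 3) : last3 y = y := by
  rw [← String.toList_inj, toList_last3, h]
  simp

-- folding `erase` over a key list filters the items
theorem items_foldl_erase (L : List String) (d : PySem.Dict String Int) :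
    (L.foldl (fun d' k => d'.erase k) d).items
      = d.items.filter (fun p => !(decide (p.1 ∈ L))) := by
  induction L generalizing d with
  | nil => simp
  | cons a L ih =>
      rw [List.foldl_cons, ih, show (d.erase a).items = d.items.filter (fun p => !(p.1 == a)) from rfl,
        List.filter_filter]
      apply List.filter_congr
      intro p _
      rcases eq_or_ne p.1 a with h | h
      · simp [h]
      · simp [h]

-- an inner loop that conditionally adds the SAME element x
theorem foldl_add_same (K : List String) (c : String → Bool) (x : String) (s : PySem.Set String) :
    K.foldl (fun s' z => if c z then PySem.Set.add s' x else s') s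
      = if K.any c then PySem.Set.add s x else s := by
  induction K generalizing s with
  | nil => simp
  | cons a K ih =>
      by_cases h : c a = true
      · simp only [List.foldl_cons, h, if_true, ih, List.any_cons, Bool.true_or]
        by_cases h2 : K.any c = true
        · rw [if_pos h2]
          exact PySem.Set.add_of_mem (by simp [PySem.Set.mem_add])
        · simp [h2]
      · simp [List.foldl_cons, h, ih, List.any_cons]

-- membership in a conditional-add fold
theorem mem_foldl_cond_add (K : List String) (c : String → Bool) (s0 : PySem.Set String) (y : String) :
    y ∈ K.foldl (fun s x => if c x then PySem.Set.add s x else s) s0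
      ↔ y ∈ s0 ∨ (y ∈ K ∧ c y = true) := by
  induction K generalizing s0 with
  | nil => simp
  | cons a K ih =>
      by_cases h : c a = true
      · simp only [List.foldl_cons, h, if_true, ih, PySem.Set.mem_add, List.mem_cons]
        constructor
        · rintro ((hy | rfl) | hy) <;> tauto
        · rintro (hy | ⟨(rfl | hy), hc⟩) <;> tauto
      · simp only [List.foldl_cons, h, ih, List.mem_cons]
        constructor
        · tauto
        · rintro (hy | ⟨(rfl | hy), hc⟩)
          · tauto
          · rw [hc] at h; exact absurd rfl h
          · tauto

-- membership in A's to_del set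
theorem mem_to_del (K : List String) (y : String) :
    y ∈ K.foldl (fun s x =>
        if PySem.Str.len x == 3 then
          K.foldl (fun s' z =>
            if PySem.Str.endswith z x && z != x then PySem.Set.add s' x else s') s
        else s) PySem.Set.empty
      ↔ y ∈ K ∧ delCond K y := by
  have hstep : (fun (s : PySem.Set String) x =>
        if PySem.Str.len x == 3 then
          K.foldl (fun s' z =>
            if PySem.Str.endswith z x && z != x then PySem.Set.add s' x else s') s
        else s)
      = (fun (s : PySem.Set String) x =>
          if (PySem.Str.len x == 3 && K.any (fun z => PySem.Str.endswith z x && z != x)) then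
            PySem.Set.add s x else s) := by
    funext s x
    by_cases h : (x.length : Int) = 3
    · rw [if_pos (by simp [PySem.Str.len_eq, h]), foldl_add_same]
      simp [PySem.Str.len_eq, h]
    · simp [PySem.Str.len_eq, h]
  rw [hstep, mem_foldl_cond_add]
  simp only [PySem.Set.empty, List.not_mem_nil, false_or]
  constructor
  · rintro ⟨hyK, hc⟩
    simp only [Bool.and_eq_true, beq_iff_eq, List.any_eq_true, bne_iff_ne,
      PySem.Str.len_eq, PySem.Str.endswith_eq, PySem.Chars.endswith_iff] at hc
    obtain ⟨h3, z, hzK, hsuf, hzy⟩ := hc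
    exact ⟨hyK, by exact_mod_cast h3, z, hzK, hsuf, hzy⟩
  · rintro ⟨hyK, h3, z, hzK, hsuf, hzy⟩
    refine ⟨hyK, ?_⟩
    simp only [Bool.and_eq_true, beq_iff_eq, List.any_eq_true, bne_iff_ne,
      PySem.Str.len_eq, PySem.Str.endswith_eq, PySem.Chars.endswith_iff]
    exact ⟨by exact_mod_cast h3, z, hzK, hsuf, hzy⟩

-- a list with two distinct members has length > 1
theorem one_lt_length_of_two_mem {l : List String} {a b : String}
    (ha : a ∈ l) (hb : b ∈ l) (hne : a ≠ b) : 1 < l.length := by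
  match l with
  | [] => simp at ha
  | [c] => simp at ha hb; exact absurd (ha.trans hb.symm) hne
  | c :: d :: t => simp

-- a Nodup list of length > 1 has a member different from any given member
theorem exists_ne_of_one_lt_length {l : List String} {x : String}
    (hnd : l.Nodup) (hx : x ∈ l) (hl : 1 < l.length) : ∃ z ∈ l, z ≠ x := by
  match l with
  | [] => simp at hx
  | [c] => simp at hl
  | c :: d :: t =>
      by_cases hc : c = x
      · refine ⟨d, by simp, ?_⟩
        subst hc
        intro hdx
        subst hdx
        exact (List.nodup_cons.mp hnd).1 (by simp)
      · exact ⟨c, by simp, hc⟩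

-- B's deleted keys (a group's length-3 member, for groups with >1 member) are exactly delCond
theorem mem_bdel (K : List String) (hnd : K.Nodup) (y : String) :
    (∃ s ∈ PySem.Set.ofList ((K.filter fun k => decide (3 ≤ PySem.Str.len k)).map last3),
        y ∈ (if 1 < ((K.filter fun k => decide (3 ≤ PySem.Str.len k)).filter
                (fun k => last3 k == s)).length then
              ((K.filter fun k => decide (3 ≤ PySem.Str.len k)).filter
                (fun k => last3 k == s)).filter (fun k => PySem.Str.len k == 3)
             else []))
      ↔ y ∈ K ∧ delCond K y := by
  set F := K.filter fun k => decide (3 ≤ PySem.Str.len k) with hF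
  have hmemF : ∀ k, k ∈ F ↔ k ∈ K ∧ 3 ≤ k.toList.length := by
    intro k; simp [hF, PySem.Str.len_eq]
  constructor
  · rintro ⟨s, hs, hy⟩
    rw [PySem.Set.mem_ofList] at hs
    by_cases hlen : 1 < (F.filter (fun k => last3 k == s)).length
    · rw [if_pos hlen] at hy
      rw [List.mem_filter, List.mem_filter] at hy
      obtain ⟨⟨hyF, hys⟩, hy3⟩ := hy
      have hy3' : y.toList.length = 3 := by
        have := beq_iff_eq.mp hy3
        rw [PySem.Str.len_eq] at this
        exact_mod_cast this
      have hsy : s = y := by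
        have := beq_iff_eq.mp hys
        rw [last3_of_len3 hy3'] at this
        exact this.symm
      have hndG : (F.filter (fun k => last3 k == s)).Nodup :=
        (hnd.filter _).filter _
      obtain ⟨z, hzG, hzy⟩ := exists_ne_of_one_lt_length hndG
        (List.mem_filter.mpr ⟨hyF, hys⟩) hlen
      rw [List.mem_filter] at hzG
      obtain ⟨hzF, hzs⟩ := hzG
      have hzK := ((hmemF z).mp hzF).1
      have hsuf : y.toList <:+ z.toList := by
        have h2 := beq_iff_eq.mp hzs
        rw [← String.toList_inj, toList_last3, hsy] at h2
        rw [← h2]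
        exact List.drop_suffix _ _
      exact ⟨((hmemF y).mp hyF).1, hy3', z, hzK, hsuf, hzy⟩
    · rw [if_neg hlen] at hy
      simp at hy
  · rintro ⟨hyK, hy3, z, hzK, hsuf, hzy⟩
    have hyF : y ∈ F := (hmemF y).mpr ⟨hyK, by omega⟩
    have hzlen : 3 ≤ z.toList.length := by
      have := hsuf.length_le
      omega
    have hzF : z ∈ F := (hmemF z).mpr ⟨hzK, hzlen⟩
    have hlast3z : last3 z = y := by
      obtain ⟨t, ht⟩ := hsuf
      rw [← String.toList_inj, toList_last3, ← ht]
      have hlt : (t ++ y.toList).length - 3 = t.length := by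
        simp [hy3]
      rw [hlt, List.drop_left]
    refine ⟨y, by rw [PySem.Set.mem_ofList]; exact List.mem_map.mpr ⟨y, hyF, last3_of_len3 hy3⟩, ?_⟩
    have hyG : y ∈ F.filter (fun k => last3 k == y) :=
      List.mem_filter.mpr ⟨hyF, by simp [last3_of_len3 hy3]⟩
    have hzG : z ∈ F.filter (fun k => last3 k == y) :=
      List.mem_filter.mpr ⟨hzF, by simp [hlast3z]⟩
    rw [if_pos (one_lt_length_of_two_mem hzG hyG hzy)]
    exact List.mem_filter.mpr ⟨hyG, by simp [PySem.Str.len_eq, hy3]⟩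

-- B's grouping loop is the pair fold over the length-filtered keys
theorem groups_eq (K : List String) :
    K.foldl (fun g k =>
        if 3 ≤ PySem.Str.len k then g.modify (PySem.Str.slice k (some (-3)) none) [] (· ++ [k]) else g)
      PySem.Dict.empty
      = ((K.filter (fun k => decide (3 ≤ PySem.Str.len k))).map (fun k => (last3 k, k))).foldl
          (fun g p => g.modify p.1 [] (· ++ [p.2])) PySem.Dict.empty := by
  have hfun : (fun (g : PySem.Dict String (List String)) k =>
        if decide (3 ≤ PySem.Str.len k) = true then g.modify (last3 k) [] (· ++ [k]) else g)
      = (fun (g : PySem.Dict String (List String)) k =>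
          if 3 ≤ PySem.Str.len k then g.modify (PySem.Str.slice k (some (-3)) none) [] (· ++ [k]) else g) := by
    funext g k
    simp [last3]
  rw [List.foldl_map, List.foldl_filter, hfun]

-- a fold of per-group erase loops is one erase fold over the flattened selection
theorem foldl_flat_erase (vs : List (List String)) (sel : List String → List String)
    (d : PySem.Dict String Int) :
    vs.foldl (fun d' ks => (sel ks).foldl (fun d'' k => d''.erase k) d') d
      = (vs.flatMap sel).foldl (fun d' k => d'.erase k) d := by
  induction vs generalizing d with
  | nil => simp
  | cons a vs ih => simp [List.flatMap_cons, List.foldl_append, ih]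

-- B's erase phase, flattened and expressed as one filter of the items
theorem items_B_phase (vs : List (List String)) (d : PySem.Dict String Int) :
    (vs.foldl (fun d' ks =>
        if 1 < ks.length then
          ks.foldl (fun d'' k => if PySem.Str.len k == 3 then d''.erase k else d'') d'
        else d') d).items
      = d.items.filter (fun p =>
          !(decide (p.1 ∈ vs.flatMap (fun ks =>
              if 1 < ks.length then ks.filter (fun k => PySem.Str.len k == 3) else [])))) := by
  have hstep : (fun (d' : PySem.Dict String Int) (ks : List String) =>
        if 1 < ks.length then
          ks.foldl (fun d'' k => if PySem.Str.len k == 3 then d''.erase k else d'') d'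
        else d')
      = (fun (d' : PySem.Dict String Int) ks =>
          ((if 1 < ks.length then ks.filter (fun k => PySem.Str.len k == 3) else []) : List String).foldl
            (fun d'' k => d''.erase k) d') := by
    funext d' ks
    by_cases h : 1 < ks.length
    · rw [if_pos h, if_pos h, List.foldl_filter]
    · rw [if_neg h, if_neg h, List.foldl_nil]
  rw [hstep, foldl_flat_erase, items_foldl_erase]

-- ===== VERDICT (by name: the statement is the Claim_ definition above) =====
theorem remove_subset_spec : Claim_equal_remove_subset := by
  unfold Claim_equal_remove_subset
  intro dct_word _
  unfold Spec_remove_subset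
  simp only [remove_subset, remove_subset_alt]
  generalize hdd : PySem.Dict.ofList dct_word = d
  have hnd : (PySem.Dict.keys d).Nodup := by
    rw [← hdd]
    exact PySem.Dict.nodup_keys_ofList dct_word
  set K := PySem.Dict.keys d with hK
  rw [items_foldl_erase, groups_eq, items_B_phase]
  set F := K.filter fun k => decide (3 ≤ PySem.Str.len k) with hF
  set groupsB := ((F.map (fun k => (last3 k, k))).foldl
      (fun g p => g.modify p.1 [] (· ++ [p.2])) PySem.Dict.empty) with hg
  have hkeys : groupsB.keys = PySem.Set.ofList (F.map last3) := by
    rw [hg, PySem.Dict.keys_foldl_modify_key _ Prod.fst [] (fun _ p => (· ++ [p.2]))]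
    simp [PySem.Dict.keys_empty, PySem.Set.update_nil_left, List.map_map, Function.comp_def]
  have hndk : groupsB.keys.Nodup := by
    rw [hg]
    exact PySem.Dict.nodup_keys_foldl_modify_key _ Prod.fst [] (fun _ p => (· ++ [p.2])) _
      PySem.Dict.nodup_keys_empty
  have hgetD : ∀ s, groupsB.getD s [] = F.filter (fun k => last3 k == s) := by
    intro s
    rw [hg, PySem.Dict.getD_foldl_modify_append]
    simp [PySem.Dict.getD_empty, List.filter_map, List.map_map, Function.comp_def]
  have hvalues : groupsB.values
      = (PySem.Set.ofList (F.map last3)).map (fun s => F.filter (fun k => last3 k == s)) := by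
    rw [PySem.Dict.values_eq_map_keys groupsB hndk [], hkeys]
    exact List.map_congr_left (fun s _ => hgetD s)
  apply List.filter_congr
  intro p _
  congr 1
  rw [decide_eq_decide, mem_to_del, ← mem_bdel K hnd p.1, hvalues]
  rw [List.mem_flatMap]
  constructor
  · rintro ⟨s, hs, hp⟩
    exact ⟨_, List.mem_map.mpr ⟨s, hs, rfl⟩, hp⟩
  · rintro ⟨ks, hks, hp⟩
    obtain ⟨s, hs, rfl⟩ := List.mem_map.mp hks
    exact ⟨s, hs, hp⟩
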